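-- pv_equiv track=rewrite | github.com/helder53/Problem_Solving | Programmers/Level2/광물 캐기.py | others
-- ===== SOURCE A (Python) =====
-- def others(picks, minerals):
--     def solve(picks, minerals, fatigue):
--         if sum(picks) == 0 or len(minerals) == 0:
--             return fatigue
--         result = [float('inf')]
--         for i, fatigues in enumerate(({"diamond": 1, "iron": 1, "stone": 1},
--                                       {"diamond": 5, "iron": 1, "stone": 1},
--                                       {"diamond": 25, "iron": 5, "stone": 1},)):
--             if picks[i] > 0:
--                 next_picks = picks.copy()
--                 next_picks[i] -= 1
--                 next_fatigue = fatigue + sum(fatigues[mineral] for mineral in minerals[:5])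
--                 result.append(solve(next_picks, minerals[5:], next_fatigue))
--         return min(result)
--
--     return solve(picks, minerals, 0)
-- ===== SOURCE B (Python) =====
-- def others(picks, minerals):
--     # Bottom-up DP over (remaining diamond, iron, stone picks) instead of
--     # exhaustive 3^k recursion; pick counts are capped at the number of
--     # 5-mineral chunks since extra picks can never be used.
--     if sum(picks) == 0 or not minerals:      # nothing to mine / no picks left
--         return 0
--     COST = {"diamond": (1, 5, 25), "iron": (1, 1, 5), "stone": (1, 1, 1)}
--     n = -(-len(minerals) // 5)                 # number of 5-mineral chunks
--     p0, p1, p2 = (min(p, n) for p in picks[:3])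
--
--     def chunk_cost(t, idx):
--         return sum(COST[m][t] for m in minerals[5 * idx: 5 * idx + 5])
--
--     dp = []        # dp[a][b][c] = min fatigue with a, b, c picks left
--     for a in range(p0 + 1):
--         slab = []
--         for b in range(p1 + 1):
--             row = []
--             for c in range(p2 + 1):
--                 idx = (p0 - a) + (p1 - b) + (p2 - c)   # next chunk to mine
--                 if a + b + c == 0 or idx >= n:
--                     row.append(0)
--                 else:
--                     best = None
--                     if a > 0:
--                         best = chunk_cost(0, idx) + dp[-1][b][c]
--                     if b > 0:
--                         v = chunk_cost(1, idx) + slab[-1][c]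
--                         best = v if best is None else min(best, v)
--                     if c > 0:
--                         v = chunk_cost(2, idx) + row[-1]
--                         best = v if best is None else min(best, v)
--                     row.append(best)
--             slab.append(row)
--         dp.append(slab)
--     return dp[p0][p1][p2]
-- ===== Notes on version B (the rewrite author's own statement) =====
-- stated objective: faster
-- what changed: Replaces A's exhaustive 3-way recursion over every pick sequence with a bottom-up dynamic program over (diamond, iron, stone) picks remaining (counts capped at the number of 5-mineral chunks), filling a nested-list table once.
-- outside the precondition, e.g. on others([5, -1, 6, 2], ['stone']): A returns 1, B raises IndexError; on others([1, 0, 0, 7], ['stone']): A returns 1, B returns 1; on others([1, 0, 0], ['stone', 'stone', 'stone', 'stone', 'stone', 'gold']): A returns 5, B returns 5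
import Mathlib
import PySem

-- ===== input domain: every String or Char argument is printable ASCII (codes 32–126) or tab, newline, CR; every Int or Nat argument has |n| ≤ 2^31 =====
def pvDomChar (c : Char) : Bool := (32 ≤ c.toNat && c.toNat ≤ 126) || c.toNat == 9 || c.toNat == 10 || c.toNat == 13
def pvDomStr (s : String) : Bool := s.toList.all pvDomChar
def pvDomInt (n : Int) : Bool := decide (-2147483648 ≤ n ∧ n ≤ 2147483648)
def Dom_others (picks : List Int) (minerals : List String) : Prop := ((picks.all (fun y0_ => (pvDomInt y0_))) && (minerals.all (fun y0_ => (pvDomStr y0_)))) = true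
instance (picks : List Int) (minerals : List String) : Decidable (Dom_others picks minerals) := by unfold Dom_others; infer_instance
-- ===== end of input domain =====

-- B replaces A's exhaustive 3-way recursion over every pick sequence by a bottom-up dynamic
-- program over remaining pick counts (capped at the number of 5-mineral chunks).

-- ===== PORT A =====

-- the three per-pick fatigue tables of A, in enumeration order
def pvTables : List (PySem.Dict String Int) :=
  [PySem.Dict.ofList [("diamond", 1), ("iron", 1), ("stone", 1)],
   PySem.Dict.ofList [("diamond", 5), ("iron", 1), ("stone", 1)],
   PySem.Dict.ofList [("diamond", 25), ("iron", 5), ("stone", 1)]]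

-- sum(fatigues[mineral] for mineral in minerals[:5]); an unknown mineral is a KeyError in
-- Python (excluded by Pre_): here it reads 0
def pvStepFatigue (tbl : PySem.Dict String Int) (ms : List String) : Int :=
  (ms.map (fun m => (tbl.get? m).getD 0)).sum

-- A's inner 'solve'; 'minerals[:5]'/'minerals[5:]' are take/drop (exact: nonnegative bounds);
-- 'picks[i]' out of range is an IndexError in Python (excluded by Pre_): here it reads 0;
-- when no branch fires A returns float('inf'), not an int (excluded by Pre_): here 0
def pvSolve (picks : List Int) (minerals : List String) (fatigue : Int) : Int :=
  if picks.sum = 0 ∨ minerals.length = 0 then fatigue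
  else
    let r0 := if 0 < (PySem.List.pyGet? picks 0).getD 0 then
        [pvSolve (picks.set 0 ((PySem.List.pyGet? picks 0).getD 0 - 1)) (minerals.drop 5)
          (fatigue + pvStepFatigue (pvTables.getD 0 PySem.Dict.empty) (minerals.take 5))]
      else []
    let r1 := if 0 < (PySem.List.pyGet? picks 1).getD 0 then
        [pvSolve (picks.set 1 ((PySem.List.pyGet? picks 1).getD 0 - 1)) (minerals.drop 5)
          (fatigue + pvStepFatigue (pvTables.getD 1 PySem.Dict.empty) (minerals.take 5))]
      else []
    let r2 := if 0 < (PySem.List.pyGet? picks 2).getD 0 then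
        [pvSolve (picks.set 2 ((PySem.List.pyGet? picks 2).getD 0 - 1)) (minerals.drop 5)
          (fatigue + pvStepFatigue (pvTables.getD 2 PySem.Dict.empty) (minerals.take 5))]
      else []
    (PySem.List.min? (r0 ++ r1 ++ r2) (fun x => x)).getD 0
termination_by minerals.length
decreasing_by all_goals (simp only [List.length_drop] at *; omega)

def others (picks : List Int) (minerals : List String) : Int :=
  pvSolve picks minerals 0

-- ===== PORT B =====

-- COST[m] = (diamond-pick, iron-pick, stone-pick) fatigue of mineral m
def pvCOST : PySem.Dict String (Int × Int × Int) :=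
  PySem.Dict.ofList [("diamond", (1, 5, 25)), ("iron", (1, 1, 5)), ("stone", (1, 1, 1))]

-- COST[m][t]
def pvProj (t : Nat) (v : Int × Int × Int) : Int :=
  match t with | 0 => v.1 | 1 => v.2.1 | _ => v.2.2

-- chunk_cost(t, idx) = sum(COST[m][t] for m in minerals[5*idx : 5*idx+5]);
-- an unknown mineral is a KeyError in Python (excluded by Pre_): here it reads 0
def pvChunkCost (minerals : List String) (t : Nat) (idx : Int) : Int :=
  ((PySem.List.slice minerals (some (5 * idx)) (some (5 * idx + 5))).map
    (fun m => pvProj t ((PySem.Dict.get? pvCOST m).getD (0, 0, 0)))).sum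

-- the body of Source B's innermost loop (over c); dp[-1], slab[-1], row[-1] are Python
-- negative-index reads, row.append is ++ [.]; 'best' is never None when it is read (Pre_)
def pvBodyC (minerals : List String) (n p0 p1 p2 : Int) (dp : List (List (List Int)))
    (slab : List (List Int)) (a b : Int) (row : List Int) (c : Int) : List Int :=
  let idx := (p0 - a) + (p1 - b) + (p2 - c)
  if a + b + c = 0 ∨ n ≤ idx then row ++ [(0 : Int)]
  else
    let best : Option Int :=
      if 0 < a then
        some (pvChunkCost minerals 0 idx +
          PySem.List.pyGetD (PySem.List.pyGetD (PySem.List.pyGetD dp (-1) []) b []) c 0)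
      else none
    let best : Option Int :=
      if 0 < b then
        let v := pvChunkCost minerals 1 idx +
          PySem.List.pyGetD (PySem.List.pyGetD slab (-1) []) c 0
        some (match best with | none => v | some x => min x v)
      else best
    let best : Option Int :=
      if 0 < c then
        let v := pvChunkCost minerals 2 idx + PySem.List.pyGetD row (-1) 0
        some (match best with | none => v | some x => min x v)
      else best
    row ++ [best.getD 0]

-- the body of Source B's middle loop (over b)
def pvBodyB (minerals : List String) (n p0 p1 p2 : Int) (dp : List (List (List Int))) (a : Int)
    (slab : List (List Int)) (b : Int) : List (List Int) :=
  slab ++ [(PySem.List.pyRange 0 (p2 + 1) 1).foldl (pvBodyC minerals n p0 p1 p2 dp slab a b) []]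

-- the body of Source B's outer loop (over a)
def pvBodyA (minerals : List String) (n p0 p1 p2 : Int) (dp : List (List (List Int)))
    (a : Int) : List (List (List Int)) :=
  dp ++ [(PySem.List.pyRange 0 (p1 + 1) 1).foldl (pvBodyB minerals n p0 p1 p2 dp a) []]

def others_alt (picks : List Int) (minerals : List String) : Int :=
  if picks.sum = 0 ∨ minerals.length = 0 then 0   -- nothing to mine / no picks left
  else
  let n : Int := -(PySem.Int.floordiv (-(minerals.length : Int)) 5)   -- n = -(-len // 5)
  match (PySem.List.slice picks none (some 3)).map (fun p => min p n) with
  | [p0, p1, p2] =>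
    let dp := (PySem.List.pyRange 0 (p0 + 1) 1).foldl (pvBodyA minerals n p0 p1 p2) []
    PySem.List.pyGetD (PySem.List.pyGetD (PySem.List.pyGetD dp p0 []) p1 []) p2 0
  -- fewer than 3 picks: Python raises ValueError unpacking (excluded by Pre_)
  | _ => 0

-- ===== PRECONDITION & SPEC =====
-- Pre_ is the natural domain of the puzzle (any input on which no mining step happens, or the
-- three nonnegative pick counts with only real mineral names).  Outside it, when a mining step
-- is reached on malformed input, A raises (IndexError / KeyError) or returns float('inf'),
-- which is not an int, except on a few inputs where the recursion stops before the malformed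
-- part (extra pick entries, a late unknown mineral): there A returns and B agrees or raises.
def Pre_others (picks : List Int) (minerals : List String) : Prop :=
  (picks.sum = 0 ∨ minerals = []) ∨
    (picks.length = 3 ∧ (∀ p ∈ picks, 0 ≤ p) ∧
      (∀ m ∈ minerals, m = "diamond" ∨ m = "iron" ∨ m = "stone"))
instance (picks : List Int) (minerals : List String) : Decidable (Pre_others picks minerals) := by
  unfold Pre_others; infer_instance

def pvWitness_others : List Int × List String :=
  ([1, 2, 1], ["diamond", "iron", "stone", "stone", "stone", "iron"])

def Spec_others (picks : List Int) (minerals : List String) (out : Int) : Prop := out = others_alt picks minerals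
instance (picks : List Int) (minerals : List String) (out : Int) : Decidable (Spec_others picks minerals out) := by unfold Spec_others; infer_instance

-- ===== CLAIM (what is proved, stated in full; the proofs are below) =====
def Claim_equal_others : Prop := ∀ (picks : List Int) (minerals : List String), Dom_others picks minerals → Pre_others picks minerals → Spec_others picks minerals (others picks minerals)

-- ===== LEMMAS AND PROOFS =====

-- the minimum total fatigue, written as a recursion over Nat pick counts (proof layer)
def pvG (a b c : Nat) (ms : List String) : Int :=
  if ms.length = 0 then 0
  else if a = 0 ∧ b = 0 ∧ c = 0 then 0
  else
    let o0 := if 0 < a then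
        [pvStepFatigue (pvTables.getD 0 PySem.Dict.empty) (ms.take 5) + pvG (a - 1) b c (ms.drop 5)] else []
    let o1 := if 0 < b then
        [pvStepFatigue (pvTables.getD 1 PySem.Dict.empty) (ms.take 5) + pvG a (b - 1) c (ms.drop 5)] else []
    let o2 := if 0 < c then
        [pvStepFatigue (pvTables.getD 2 PySem.Dict.empty) (ms.take 5) + pvG a b (c - 1) (ms.drop 5)] else []
    (PySem.List.min? (o0 ++ o1 ++ o2) (fun x => x)).getD 0
termination_by ms.length
decreasing_by all_goals (simp only [List.length_drop] at *; omega)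

-- B's table cell as a recursion: K = number of chunks, idx = next chunk to mine
def pvCell (ms : List String) (K : Nat) : Nat → Nat → Nat → Nat → Int
  | a, b, c, idx =>
    if a + b + c = 0 ∨ K ≤ idx then 0
    else
      let best : Option Int :=
        if 0 < a then some (pvChunkCost ms 0 (idx : Int) + pvCell ms K (a - 1) b c (idx + 1))
        else none
      let best : Option Int :=
        if 0 < b then
          let v := pvChunkCost ms 1 (idx : Int) + pvCell ms K a (b - 1) c (idx + 1)
          some (match best with | none => v | some x => min x v)
        else best
      let best : Option Int :=
        if 0 < c then
          let v := pvChunkCost ms 2 (idx : Int) + pvCell ms K a b (c - 1) (idx + 1)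
          some (match best with | none => v | some x => min x v)
        else best
      best.getD 0
termination_by a b c idx => a + b + c
decreasing_by all_goals omega

-- the fully-built row / slab / table B's loops produce
def pvRowF (ms : List String) (K P0 P1 P2 a b : Nat) : List Int :=
  (List.range (P2 + 1)).map (fun c => pvCell ms K a b c ((P0 - a) + (P1 - b) + (P2 - c)))
def pvSlabF (ms : List String) (K P0 P1 P2 a : Nat) : List (List Int) :=
  (List.range (P1 + 1)).map (fun b => pvRowF ms K P0 P1 P2 a b)
def pvDpF (ms : List String) (K P0 P1 P2 : Nat) : List (List (List Int)) :=
  (List.range (P0 + 1)).map (fun a => pvSlabF ms K P0 P1 P2 a)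

-- lookup characterisations of the two cost tables
theorem pvCOST_getD (m : String) :
    ((PySem.Dict.get? pvCOST m).getD (0, 0, 0)) =
      (if m = "diamond" then ((1 : Int), (5 : Int), (25 : Int)) else
       if m = "iron" then (1, 1, 5) else if m = "stone" then (1, 1, 1) else (0, 0, 0)) := by
  have hC : pvCOST = PySem.Dict.mk
      [("diamond", (1, 5, 25)), ("iron", (1, 1, 5)), ("stone", (1, 1, 1))] := rfl
  rw [hC]
  simp only [PySem.Dict.get?_mk_cons]
  split_ifs <;> simp_all [PySem.Dict.get?] <;> simp_all [eq_comm]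

theorem pvTables_getD (t : Nat) (ht : t < 3) (m : String) :
    ((PySem.Dict.get? (pvTables.getD t PySem.Dict.empty) m).getD 0) =
      pvProj t (if m = "diamond" then ((1 : Int), (5 : Int), (25 : Int)) else
        if m = "iron" then (1, 1, 5) else if m = "stone" then (1, 1, 1) else (0, 0, 0)) := by
  have h0 : pvTables.getD 0 PySem.Dict.empty =
      PySem.Dict.mk [("diamond", 1), ("iron", 1), ("stone", 1)] := rfl
  have h1 : pvTables.getD 1 PySem.Dict.empty =
      PySem.Dict.mk [("diamond", 5), ("iron", 1), ("stone", 1)] := rfl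
  have h2 : pvTables.getD 2 PySem.Dict.empty =
      PySem.Dict.mk [("diamond", 25), ("iron", 5), ("stone", 1)] := rfl
  interval_cases t <;> [rw [h0]; rw [h1]; rw [h2]] <;>
  · simp only [PySem.Dict.get?_mk_cons, pvProj]
    split_ifs <;> simp_all [PySem.Dict.get?] <;> simp_all [eq_comm]

-- B's chunk cost is A's per-chunk fatigue sum
theorem pvChunkCost_eq (ms : List String) (t : Nat) (ht : t < 3) (idx : Nat) :
    pvChunkCost ms t (idx : Int) =
      pvStepFatigue (pvTables.getD t PySem.Dict.empty) (((ms.drop (5 * idx)).take 5)) := by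
  have hcast : (5 * (idx : Int)) = ((5 * idx : Nat) : Int) := by push_cast; ring
  have hcast2 : (5 * (idx : Int) + 5) = ((5 * idx + 5 : Nat) : Int) := by push_cast; ring
  unfold pvChunkCost pvStepFatigue
  rw [hcast2, hcast, PySem.List.slice_natCast]
  have h5 : 5 * idx + 5 - 5 * idx = 5 := by omega
  rw [h5]
  congr 1
  apply List.map_congr_left
  intro m _
  rw [pvCOST_getD, pvTables_getD t ht]

-- n = -(-len // 5) is the chunk count
theorem pvCeil (L : Nat) : -(PySem.Int.floordiv (-(L : Int)) 5) = (((L + 4) / 5 : Nat) : Int) := by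
  cases L with
  | zero => decide
  | succ m =>
    have h : (-((m + 1 : Nat) : Int)) = Int.negSucc m := by simp [Int.negSucc_eq]
    rw [PySem.Int.floordiv, h]
    have hf : (Int.negSucc m).fdiv 5 = Int.negSucc (m / 5) := rfl
    rw [hf, Int.negSucc_eq]
    push_cast
    omega

-- B's running-min chain equals A's min over the list of fired options
theorem pvMinChain (ca cb cc : Prop) [Decidable ca] [Decidable cb] [Decidable cc]
    (v0 v1 v2 : Int) (h : ca ∨ cb ∨ cc) :
    ((if cc then
        some (match (if cb then
            some (match (if ca then some v0 else none) with | none => v1 | some x => min x v1)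
          else (if ca then some v0 else none)) with | none => v2 | some x => min x v2)
      else (if cb then
            some (match (if ca then some v0 else none) with | none => v1 | some x => min x v1)
          else (if ca then some v0 else none))).getD 0) =
    (PySem.List.min? ((if ca then [v0] else []) ++ (if cb then [v1] else []) ++
        (if cc then [v2] else [])) (fun x => x)).getD 0 := by
  by_cases hca : ca <;> by_cases hcb : cb <;> by_cases hcc : cc <;>
    simp_all [PySem.List.min?_id_cons, List.foldl]

-- adding a constant to each element shifts the minimum
theorem pvMinShift (f : Int) (l : List Int) (h : l ≠ []) :
    (PySem.List.min? (l.map (fun v => f + v)) (fun x => x)).getD 0 =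
      f + (PySem.List.min? l (fun x => x)).getD 0 := by
  have aux : ∀ (t : List Int) (x : Int),
      (t.map (fun v => f + v)).foldl min (f + x) = f + t.foldl min x := by
    intro t
    induction t with
    | nil => intro x; simp
    | cons y t ih =>
      intro x
      simp only [List.map, List.foldl]
      rw [show min (f + x) (f + y) = f + min x y by omega]
      exact ih (min x y)
  cases l with
  | nil => exact absurd rfl h
  | cons x t => simp only [List.map, PySem.List.min?_id_cons, Option.getD_some]; exact aux t x

-- A's solve = fatigue + pvG  (picks read/written at literal indices 0,1,2)
theorem pvSolve_eq (N : Nat) : ∀ (ms : List String), ms.length ≤ N → ∀ (x y z f : Int),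
    0 ≤ x → 0 ≤ y → 0 ≤ z →
    pvSolve [x, y, z] ms f = f + pvG x.toNat y.toNat z.toNat ms := by
  induction N with
  | zero =>
    intro ms hms x y z f hx hy hz
    have hm : ms = [] := List.length_eq_zero_iff.mp (by omega)
    subst hm
    rw [pvSolve, pvG]
    simp
  | succ n ih =>
    intro ms hms x y z f hx hy hz
    by_cases hm : ms.length = 0
    · rw [pvSolve, pvG]; simp [hm]
    by_cases hs : x + y + z = 0
    · have hx0 : x = 0 := by omega
      have hy0 : y = 0 := by omega
      have hz0 : z = 0 := by omega
      subst hx0; subst hy0; subst hz0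
      rw [pvSolve, pvG]
      simp [hm]
    -- main case: some pick is positive and minerals remain
    have hlen5 : (ms.drop 5).length ≤ n := by simp only [List.length_drop]; omega
    have tx : (0 < x.toNat) ↔ (0 < x) := by omega
    have ty : (0 < y.toNat) ↔ (0 < y) := by omega
    have tz : (0 < z.toNat) ↔ (0 < z) := by omega
    have g0 : (PySem.List.pyGet? [x, y, z] 0).getD 0 = x := rfl
    have g1 : (PySem.List.pyGet? [x, y, z] 1).getD 0 = y := rfl
    have g2 : (PySem.List.pyGet? [x, y, z] 2).getD 0 = z := rfl
    have cA : ¬(List.sum [x, y, z] = 0 ∨ ms.length = 0) := by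
      rintro (h | h)
      · simp only [List.sum_cons, List.sum_nil] at h; omega
      · exact hm h
    have cC : ¬(x.toNat = 0 ∧ y.toNat = 0 ∧ z.toNat = 0) := by omega
    rw [pvSolve, pvG]
    rw [if_neg cA, if_neg hm, if_neg cC]
    simp only [g0, g1, g2, List.set]
    have h0' : (if 0 < x then
          [pvSolve [x - 1, y, z] (ms.drop 5)
            (f + pvStepFatigue (pvTables.getD 0 PySem.Dict.empty) (ms.take 5))] else []) =
        List.map (fun v => f + v) (if 0 < x.toNat then
          [pvStepFatigue (pvTables.getD 0 PySem.Dict.empty) (ms.take 5) +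
            pvG (x.toNat - 1) y.toNat z.toNat (ms.drop 5)] else []) := by
      simp only [tx]
      split_ifs with h
      · rw [ih (ms.drop 5) hlen5 (x - 1) y z _ (by omega) hy hz,
          show (x - 1).toNat = x.toNat - 1 by omega]
        simp [add_assoc]
      · rfl
    have h1' : (if 0 < y then
          [pvSolve [x, y - 1, z] (ms.drop 5)
            (f + pvStepFatigue (pvTables.getD 1 PySem.Dict.empty) (ms.take 5))] else []) =
        List.map (fun v => f + v) (if 0 < y.toNat then
          [pvStepFatigue (pvTables.getD 1 PySem.Dict.empty) (ms.take 5) +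
            pvG x.toNat (y.toNat - 1) z.toNat (ms.drop 5)] else []) := by
      simp only [ty]
      split_ifs with h
      · rw [ih (ms.drop 5) hlen5 x (y - 1) z _ hx (by omega) hz,
          show (y - 1).toNat = y.toNat - 1 by omega]
        simp [add_assoc]
      · rfl
    have h2' : (if 0 < z then
          [pvSolve [x, y, z - 1] (ms.drop 5)
            (f + pvStepFatigue (pvTables.getD 2 PySem.Dict.empty) (ms.take 5))] else []) =
        List.map (fun v => f + v) (if 0 < z.toNat then
          [pvStepFatigue (pvTables.getD 2 PySem.Dict.empty) (ms.take 5) +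
            pvG x.toNat y.toNat (z.toNat - 1) (ms.drop 5)] else []) := by
      simp only [tz]
      split_ifs with h
      · rw [ih (ms.drop 5) hlen5 x y (z - 1) _ hx hy (by omega),
          show (z - 1).toNat = z.toNat - 1 by omega]
        simp [add_assoc]
      · rfl
    rw [h0', h1', h2', ← List.map_append, ← List.map_append]
    apply pvMinShift
    have hone : 0 < x ∨ 0 < y ∨ 0 < z := by omega
    rcases hone with h | h | h <;>
      simp [tx, ty, tz, h]

-- pick counts beyond the chunk count are never usable
theorem pvCap_eq (N : Nat) : ∀ (ms : List String), ms.length ≤ N → ∀ (a b c : Nat),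
    pvG a b c ms =
      pvG (min a ((ms.length + 4) / 5)) (min b ((ms.length + 4) / 5))
        (min c ((ms.length + 4) / 5)) ms := by
  induction N with
  | zero =>
    intro ms hms a b c
    have hm : ms = [] := List.length_eq_zero_iff.mp (by omega)
    subst hm
    conv_lhs => rw [pvG]
    conv_rhs => rw [pvG]
    simp
  | succ n ih =>
    intro ms hms a b c
    by_cases hm : ms.length = 0
    · conv_lhs => rw [pvG]
      conv_rhs => rw [pvG]
      simp [hm]
    by_cases h0 : a = 0 ∧ b = 0 ∧ c = 0
    · obtain ⟨ha, hb, hc⟩ := h0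
      subst ha; subst hb; subst hc
      conv_lhs => rw [pvG]
      conv_rhs => rw [pvG]
      simp [hm]
    have hK1 : 1 ≤ (ms.length + 4) / 5 := by omega
    have h0' : ¬(min a ((ms.length + 4) / 5) = 0 ∧ min b ((ms.length + 4) / 5) = 0 ∧
        min c ((ms.length + 4) / 5) = 0) := by omega
    have hlen : (ms.drop 5).length ≤ n := by simp only [List.length_drop]; omega
    have hKK : (ms.length + 4) / 5 = ((ms.drop 5).length + 4) / 5 + 1 := by
      simp only [List.length_drop]; omega
    conv_lhs => rw [pvG]
    conv_rhs => rw [pvG]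
    rw [if_neg hm, if_neg h0, if_neg hm, if_neg h0']
    have ta : (0 < min a ((ms.length + 4) / 5)) ↔ (0 < a) := by omega
    have tb : (0 < min b ((ms.length + 4) / 5)) ↔ (0 < b) := by omega
    have tc : (0 < min c ((ms.length + 4) / 5)) ↔ (0 < c) := by omega
    simp only [ta, tb, tc]
    have e0 : (0 < a) → pvG (a - 1) b c (ms.drop 5) =
        pvG (min a ((ms.length + 4) / 5) - 1) (min b ((ms.length + 4) / 5))
          (min c ((ms.length + 4) / 5)) (ms.drop 5) := by
      intro h
      rw [ih (ms.drop 5) hlen (a - 1) b c,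
        ih (ms.drop 5) hlen (min a ((ms.length + 4) / 5) - 1) _ _]
      rw [show min (a - 1) (((ms.drop 5).length + 4) / 5) =
            min (min a ((ms.length + 4) / 5) - 1) (((ms.drop 5).length + 4) / 5) by omega,
          show min b (((ms.drop 5).length + 4) / 5) =
            min (min b ((ms.length + 4) / 5)) (((ms.drop 5).length + 4) / 5) by omega,
          show min c (((ms.drop 5).length + 4) / 5) =
            min (min c ((ms.length + 4) / 5)) (((ms.drop 5).length + 4) / 5) by omega]
    have e1 : (0 < b) → pvG a (b - 1) c (ms.drop 5) =
        pvG (min a ((ms.length + 4) / 5)) (min b ((ms.length + 4) / 5) - 1)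
          (min c ((ms.length + 4) / 5)) (ms.drop 5) := by
      intro h
      rw [ih (ms.drop 5) hlen a (b - 1) c,
        ih (ms.drop 5) hlen (min a ((ms.length + 4) / 5)) _ _]
      rw [show min a (((ms.drop 5).length + 4) / 5) =
            min (min a ((ms.length + 4) / 5)) (((ms.drop 5).length + 4) / 5) by omega,
          show min (b - 1) (((ms.drop 5).length + 4) / 5) =
            min (min b ((ms.length + 4) / 5) - 1) (((ms.drop 5).length + 4) / 5) by omega,
          show min c (((ms.drop 5).length + 4) / 5) =
            min (min c ((ms.length + 4) / 5)) (((ms.drop 5).length + 4) / 5) by omega]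
    have e2 : (0 < c) → pvG a b (c - 1) (ms.drop 5) =
        pvG (min a ((ms.length + 4) / 5)) (min b ((ms.length + 4) / 5))
          (min c ((ms.length + 4) / 5) - 1) (ms.drop 5) := by
      intro h
      rw [ih (ms.drop 5) hlen a b (c - 1),
        ih (ms.drop 5) hlen (min a ((ms.length + 4) / 5)) _ _]
      rw [show min a (((ms.drop 5).length + 4) / 5) =
            min (min a ((ms.length + 4) / 5)) (((ms.drop 5).length + 4) / 5) by omega,
          show min b (((ms.drop 5).length + 4) / 5) =
            min (min b ((ms.length + 4) / 5)) (((ms.drop 5).length + 4) / 5) by omega,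
          show min (c - 1) (((ms.drop 5).length + 4) / 5) =
            min (min c ((ms.length + 4) / 5) - 1) (((ms.drop 5).length + 4) / 5) by omega]
    split_ifs <;>
      (try rw [e0 ‹0 < a›]) <;> (try rw [e1 ‹0 < b›]) <;> (try rw [e2 ‹0 < c›]) <;> rfl

-- B's cell recursion computes pvG on the mineral suffix
theorem pvCell_eq (F : Nat) : ∀ (ms : List String) (a b c : Nat), a + b + c ≤ F → ∀ (idx : Nat),
    pvCell ms ((ms.length + 4) / 5) a b c idx = pvG a b c (ms.drop (5 * idx)) := by
  induction F with
  | zero =>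
    intro ms a b c habc idx
    have ha : a = 0 := by omega
    have hb : b = 0 := by omega
    have hc : c = 0 := by omega
    subst ha; subst hb; subst hc
    rw [pvCell, if_pos (Or.inl rfl)]
    conv_rhs => rw [pvG]
    simp
  | succ F ih =>
    intro ms a b c habc idx
    by_cases hcond : a + b + c = 0 ∨ (ms.length + 4) / 5 ≤ idx
    · rw [pvCell, if_pos hcond]
      rcases hcond with h | h
    
      · have ha : a = 0 := by omega
        have hb : b = 0 := by omega
        have hc : c = 0 := by omega
        subst ha; subst hb; subst hc
        conv_rhs => rw [pvG]
        simp
      · have hnil : ms.drop (5 * idx) = [] := List.drop_eq_nil_of_le (by omega)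
        rw [hnil]
        conv_rhs => rw [pvG]
        simp
    · have hcond' := hcond
      push Not at hcond'
      obtain ⟨habc0, hidx⟩ := hcond'
      have hone : 0 < a ∨ 0 < b ∨ 0 < c := by omega
      have hlen : ¬((ms.drop (5 * idx)).length = 0) := by simp only [List.length_drop]; omega
      rw [pvCell, if_neg hcond]
      conv_rhs => rw [pvG]
      rw [if_neg hlen, if_neg (by omega : ¬(a = 0 ∧ b = 0 ∧ c = 0))]
      rw [pvMinChain (0 < a) (0 < b) (0 < c) _ _ _ hone]
      rw [pvChunkCost_eq ms 0 (by omega) idx, pvChunkCost_eq ms 1 (by omega) idx,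
          pvChunkCost_eq ms 2 (by omega) idx]
      simp only [List.drop_drop]
      rw [show 5 * idx + 5 = 5 * (idx + 1) by ring]
      split_ifs <;>
        (try rw [ih ms (a - 1) b c (by omega) (idx + 1)]) <;>
        (try rw [ih ms a (b - 1) c (by omega) (idx + 1)]) <;>
        (try rw [ih ms a b (c - 1) (by omega) (idx + 1)]) <;> rfl

-- the three loop-correctness lemmas for B's folds
theorem pvRow_lemma (ms : List String) (K P0 P1 P2 a b : Nat) (ha : a ≤ P0) (hb : b ≤ P1) :
    ∀ (j : Nat), j ≤ P2 + 1 →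
    (PySem.List.pyRange 0 (j : Int) 1).foldl
      (pvBodyC ms (K : Int) (P0 : Int) (P1 : Int) (P2 : Int)
        ((List.range a).map (fun a' => pvSlabF ms K P0 P1 P2 a'))
        ((List.range b).map (fun b' => pvRowF ms K P0 P1 P2 a b')) (a : Int) (b : Int)) [] =
    (List.range j).map (fun c => pvCell ms K a b c ((P0 - a) + (P1 - b) + (P2 - c))) := by
  intro j
  induction j with
  | zero =>
    intro _
    rw [show ((0 : Nat) : Int) = 0 from rfl, PySem.List.pyRange_one_eq_nil (by omega)]
    simp
  | succ j ihj =>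
    intro hj
    have hjP : j ≤ P2 := by omega
    have hc : ((j + 1 : Nat) : Int) = (j : Int) + 1 := by push_cast; ring
    rw [hc, PySem.List.pyRange_one_succ_right (by omega : (0 : Int) ≤ (j : Int)),
      List.foldl_append, ihj (by omega)]
    simp only [List.foldl_cons, List.foldl_nil]
    rw [List.range_succ, List.map_append]
    simp only [List.map_cons, List.map_nil]
    rw [pvCell]
    simp only [pvBodyC]
    have look0 : 0 < a →
        PySem.List.pyGetD (PySem.List.pyGetD (PySem.List.pyGetD
            ((List.range a).map (fun a' => pvSlabF ms K P0 P1 P2 a')) (-1) []) (b : Int) [])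
          (j : Int) 0 =
        pvCell ms K (a - 1) b j ((P0 - a) + (P1 - b) + (P2 - j) + 1) := by
      intro h
      obtain ⟨a', rfl⟩ : ∃ a', a = a' + 1 := ⟨a - 1, by omega⟩
      rw [List.range_succ, List.map_append]
      simp only [List.map_cons, List.map_nil]
      rw [PySem.List.pyGetD_neg_one_append_singleton]
      simp only [pvSlabF, pvRowF]
      simp only [PySem.List.pyGetD_natCast]
      rw [PySem.List.getD_map_range _ _ _ _ (by omega : b < P1 + 1),
        PySem.List.getD_map_range _ _ _ _ (by omega : j < P2 + 1)]
      rw [show (P0 - (a' + 1)) + (P1 - b) + (P2 - j) + 1 = (P0 - a') + (P1 - b) + (P2 - j)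
        by omega]
      rw [show a' + 1 - 1 = a' by omega]
    have look1 : 0 < b →
        PySem.List.pyGetD (PySem.List.pyGetD
            ((List.range b).map (fun b' => pvRowF ms K P0 P1 P2 a b')) (-1) []) (j : Int) 0 =
        pvCell ms K a (b - 1) j ((P0 - a) + (P1 - b) + (P2 - j) + 1) := by
      intro h
      obtain ⟨b', rfl⟩ : ∃ b', b = b' + 1 := ⟨b - 1, by omega⟩
      rw [List.range_succ, List.map_append]
      simp only [List.map_cons, List.map_nil]
      rw [PySem.List.pyGetD_neg_one_append_singleton]
      simp only [pvRowF]
      simp only [PySem.List.pyGetD_natCast]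
      rw [PySem.List.getD_map_range _ _ _ _ (by omega : j < P2 + 1)]
      rw [show (P0 - a) + (P1 - (b' + 1)) + (P2 - j) + 1 = (P0 - a) + (P1 - b') + (P2 - j)
        by omega]
      rw [show b' + 1 - 1 = b' by omega]
    have look2 : 0 < j →
        PySem.List.pyGetD
            ((List.range j).map (fun c => pvCell ms K a b c ((P0 - a) + (P1 - b) + (P2 - c))))
            (-1) 0 =
        pvCell ms K a b (j - 1) ((P0 - a) + (P1 - b) + (P2 - j) + 1) := by
      intro h
      obtain ⟨j', rfl⟩ : ∃ j', j = j' + 1 := ⟨j - 1, by omega⟩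
      rw [List.range_succ, List.map_append]
      simp only [List.map_cons, List.map_nil]
      rw [PySem.List.pyGetD_neg_one_append_singleton]
      rw [show (P0 - a) + (P1 - b) + (P2 - (j' + 1)) + 1 = (P0 - a) + (P1 - b) + (P2 - j')
        by omega]
      rw [show j' + 1 - 1 = j' by omega]
    have c1 : ((a : Int) + (b : Int) + (j : Int) = 0) ↔ (a + b + j = 0) := by omega
    have c3a : (0 < (a : Int)) ↔ (0 < a) := by omega
    have c3b : (0 < (b : Int)) ↔ (0 < b) := by omega
    have c3c : (0 < (j : Int)) ↔ (0 < j) := by omega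
    have hidx : ((P0 : Int) - (a : Int)) + ((P1 : Int) - (b : Int)) + ((P2 : Int) - (j : Int)) =
        (((P0 - a) + (P1 - b) + (P2 - j) : Nat) : Int) := by omega
    simp only [c1, c3a, c3b, c3c, hidx, Nat.cast_le]
    split_ifs <;>
      (try rw [look0 ‹0 < a›]) <;> (try rw [look1 ‹0 < b›]) <;> (try rw [look2 ‹0 < j›]) <;>
      rfl

theorem pvSlab_lemma (ms : List String) (K P0 P1 P2 a : Nat) (ha : a ≤ P0) :
    ∀ (j : Nat), j ≤ P1 + 1 →
    (PySem.List.pyRange 0 (j : Int) 1).foldl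
      (pvBodyB ms (K : Int) (P0 : Int) (P1 : Int) (P2 : Int)
        ((List.range a).map (fun a' => pvSlabF ms K P0 P1 P2 a')) (a : Int)) [] =
    (List.range j).map (fun b => pvRowF ms K P0 P1 P2 a b) := by
  intro j
  induction j with
  | zero =>
    intro _
    rw [show ((0 : Nat) : Int) = 0 from rfl, PySem.List.pyRange_one_eq_nil (by omega)]
    simp
  | succ j ihj =>
    intro hj
    have hc : ((j + 1 : Nat) : Int) = (j : Int) + 1 := by push_cast; ring
    rw [hc, PySem.List.pyRange_one_succ_right (by omega : (0 : Int) ≤ (j : Int)),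
      List.foldl_append, ihj (by omega)]
    simp only [List.foldl_cons, List.foldl_nil]
    rw [List.range_succ, List.map_append]
    simp only [List.map_cons, List.map_nil, pvBodyB]
    rw [show ((P2 : Int) + 1) = ((P2 + 1 : Nat) : Int) by push_cast; ring]
    rw [pvRow_lemma ms K P0 P1 P2 a j ha (by omega) (P2 + 1) (le_refl _)]
    simp only [pvRowF]

theorem pvDp_lemma (ms : List String) (K P0 P1 P2 : Nat) :
    ∀ (j : Nat), j ≤ P0 + 1 →
    (PySem.List.pyRange 0 (j : Int) 1).foldl
      (pvBodyA ms (K : Int) (P0 : Int) (P1 : Int) (P2 : Int)) [] =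
    (List.range j).map (fun a => pvSlabF ms K P0 P1 P2 a) := by
  intro j
  induction j with
  | zero =>
    intro _
    rw [show ((0 : Nat) : Int) = 0 from rfl, PySem.List.pyRange_one_eq_nil (by omega)]
    simp
  | succ j ihj =>
    intro hj
    have hc : ((j + 1 : Nat) : Int) = (j : Int) + 1 := by push_cast; ring
    rw [hc, PySem.List.pyRange_one_succ_right (by omega : (0 : Int) ≤ (j : Int)),
      List.foldl_append, ihj (by omega)]
    simp only [List.foldl_cons, List.foldl_nil]
    rw [List.range_succ, List.map_append]
    simp only [List.map_cons, List.map_nil, pvBodyA]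
    rw [show ((P1 : Int) + 1) = ((P1 + 1 : Nat) : Int) by push_cast; ring]
    rw [pvSlab_lemma ms K P0 P1 P2 j (by omega) (P1 + 1) (le_refl _)]
    simp only [pvSlabF]

-- B computes pvCell at the full capped pick counts
theorem pvAlt_eq (x y z : Int) (ms : List String) (hx : 0 ≤ x) (hy : 0 ≤ y) (hz : 0 ≤ z) :
    others_alt [x, y, z] ms =
      pvCell ms ((ms.length + 4) / 5) (min x.toNat ((ms.length + 4) / 5))
        (min y.toNat ((ms.length + 4) / 5)) (min z.toNat ((ms.length + 4) / 5)) 0 := by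
  by_cases hc : List.sum [x, y, z] = 0 ∨ ms.length = 0
  · rw [others_alt, if_pos hc]
    rw [pvCell, if_pos (by
      rcases hc with h | h
      · left; simp only [List.sum_cons, List.sum_nil] at h; omega
      · right; omega)]
  have hn := pvCeil ms.length
  rw [others_alt, if_neg hc]
  rw [show (PySem.List.slice [x, y, z] none (some 3) : List Int) = [x, y, z] from rfl]
  simp only [List.map_cons, List.map_nil]
  rw [hn]
  rw [show min x (((ms.length + 4) / 5 : Nat) : Int) =
        ((min x.toNat ((ms.length + 4) / 5) : Nat) : Int) by omega,
      show min y (((ms.length + 4) / 5 : Nat) : Int) =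
        ((min y.toNat ((ms.length + 4) / 5) : Nat) : Int) by omega,
      show min z (((ms.length + 4) / 5 : Nat) : Int) =
        ((min z.toNat ((ms.length + 4) / 5) : Nat) : Int) by omega]
  rw [show ((min x.toNat ((ms.length + 4) / 5) : Nat) : Int) + 1 =
        ((min x.toNat ((ms.length + 4) / 5) + 1 : Nat) : Int) by push_cast; ring]
  rw [pvDp_lemma ms ((ms.length + 4) / 5) (min x.toNat ((ms.length + 4) / 5))
        (min y.toNat ((ms.length + 4) / 5)) (min z.toNat ((ms.length + 4) / 5))
        (min x.toNat ((ms.length + 4) / 5) + 1) (le_refl _)]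
  simp only [PySem.List.pyGetD_natCast]
  rw [PySem.List.getD_map_range _ _ _ _ (by omega :
      min x.toNat ((ms.length + 4) / 5) < min x.toNat ((ms.length + 4) / 5) + 1)]
  simp only [pvSlabF]
  rw [PySem.List.getD_map_range _ _ _ _ (by omega :
      min y.toNat ((ms.length + 4) / 5) < min y.toNat ((ms.length + 4) / 5) + 1)]
  simp only [pvRowF]
  rw [PySem.List.getD_map_range _ _ _ _ (by omega :
      min z.toNat ((ms.length + 4) / 5) < min z.toNat ((ms.length + 4) / 5) + 1)]
  rw [show (min x.toNat ((ms.length + 4) / 5) - min x.toNat ((ms.length + 4) / 5)) +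
      (min y.toNat ((ms.length + 4) / 5) - min y.toNat ((ms.length + 4) / 5)) +
      (min z.toNat ((ms.length + 4) / 5) - min z.toNat ((ms.length + 4) / 5)) = 0 by omega]

-- ===== VERDICT (by name: the statement is the Claim_ definition above) =====
theorem others_spec : Claim_equal_others := by
  intro picks ms _hdom hpre
  unfold Spec_others
  by_cases hc : picks.sum = 0 ∨ ms.length = 0
  · show pvSolve picks ms 0 = others_alt picks ms
    rw [pvSolve, if_pos hc, others_alt, if_pos hc]
  have hpre' : picks.length = 3 ∧ (∀ p ∈ picks, 0 ≤ p) ∧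
      (∀ m ∈ ms, m = "diamond" ∨ m = "iron" ∨ m = "stone") := by
    rcases hpre with h | h
    · exfalso
      rcases h with h | h
      · exact hc (Or.inl h)
      · exact hc (Or.inr (by rw [h]; rfl))
    · exact h
  obtain ⟨hlen, hpos, _⟩ := hpre'
  match picks, hlen with
  | [x, y, z], _ =>
    have hx : 0 ≤ x := hpos x (by simp)
    have hy : 0 ≤ y := hpos y (by simp)
    have hz : 0 ≤ z := hpos z (by simp)
    have h1 : others [x, y, z] ms = pvG x.toNat y.toNat z.toNat ms := by
      have := pvSolve_eq ms.length ms le_rfl x y z 0 hx hy hz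
      simpa [others] using this
    have h2 := pvCap_eq ms.length ms le_rfl x.toNat y.toNat z.toNat
    have h3 := pvCell_eq (x.toNat + y.toNat + z.toNat)                      -- fuel
      ms (min x.toNat ((ms.length + 4) / 5)) (min y.toNat ((ms.length + 4) / 5))
      (min z.toNat ((ms.length + 4) / 5)) (by omega) 0
    have h4 := pvAlt_eq x y z ms hx hy hz
    rw [h1, h2, h4, h3]
    simp
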